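-- pv_equiv track=rewrite | github.com/fagan2888/bsr | bsr/plotting.py | sort_method_list
-- ===== SOURCE A (Python) =====
-- def sort_method_list(unsorted):
--     """Sort methods so vanilla runs come before adaptive runs and standard
--     nested sampling comes before dynamic nested sampling."""
--     out = []
--     out += sorted([meth for meth in unsorted
--                    if ('False' in meth and 'None' in meth)])
--     out += sorted([meth for meth in unsorted
--                    if ('False' in meth and 'None' not in meth)])
--     out += sorted([meth for meth in unsorted
--                    if ('True' in meth and 'None' in meth)])
--     out += sorted([meth for meth in unsorted
--                    if ('True' in meth and 'None' not in meth)])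
--     assert set(out) == set(unsorted), [set(out), set(unsorted)]
--     return out
-- ===== SOURCE B (Python) =====
-- def sort_method_list(unsorted):
--     """Sort methods so vanilla runs come before adaptive runs and standard
--     nested sampling comes before dynamic nested sampling."""
--     pairs = []
--     for meth in unsorted:
--         has_f = 'False' in meth
--         has_t = 'True' in meth
--         has_n = 'None' in meth
--         if has_f and has_n:
--             pairs.append((0, meth))
--         if has_f and not has_n:
--             pairs.append((1, meth))
--         if has_t and has_n:
--             pairs.append((2, meth))
--         if has_t and not has_n:
--             pairs.append((3, meth))
--     out = [meth for _, meth in sorted(pairs)]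
--     assert set(out) == set(unsorted), [set(out), set(unsorted)]
--     return out
-- ===== Notes on version B (the rewrite author's own statement) =====
-- stated objective: alternative
-- what changed: B makes one pass tagging each method with the rank of every category it matches (emitting one (rank, meth) pair per matching predicate, so double-matching strings still appear twice) and then performs a single lexicographic sort of the tagged pairs, instead of A's four separate filter-then-sort passes.
import Mathlib
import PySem

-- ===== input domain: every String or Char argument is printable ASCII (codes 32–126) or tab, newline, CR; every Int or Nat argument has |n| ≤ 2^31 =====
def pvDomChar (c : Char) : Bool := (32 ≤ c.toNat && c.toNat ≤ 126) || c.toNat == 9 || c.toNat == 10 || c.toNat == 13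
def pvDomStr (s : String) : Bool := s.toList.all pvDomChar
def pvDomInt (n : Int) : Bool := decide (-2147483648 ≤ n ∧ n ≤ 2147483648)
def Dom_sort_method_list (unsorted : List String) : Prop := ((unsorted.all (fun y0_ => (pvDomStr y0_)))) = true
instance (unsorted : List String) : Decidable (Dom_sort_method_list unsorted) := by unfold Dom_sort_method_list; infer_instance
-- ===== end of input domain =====

-- B replaces A's four filter-then-sort passes by one pass that tags every method with the rank of
-- each category it matches, followed by a single lexicographic sort of the (rank, method) pairs
-- (objective: alternative decomposition, same asymptotic cost).

-- ===== PORT A =====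
-- A's final `assert set(out) == set(unsorted)` passes exactly on Pre_ (every method contains
-- 'False' or 'True'); outside Pre_ the Python A raises AssertionError, so the assert is not ported.
def sort_method_list (unsorted : List String) : List String :=
  let out : List String := []
  let out := out ++ PySem.List.sorted
    (unsorted.filter (fun meth => PySem.Str.isIn "False" meth && PySem.Str.isIn "None" meth)) (fun x => x) false
  let out := out ++ PySem.List.sorted
    (unsorted.filter (fun meth => PySem.Str.isIn "False" meth && !PySem.Str.isIn "None" meth)) (fun x => x) false
  let out := out ++ PySem.List.sorted
    (unsorted.filter (fun meth => PySem.Str.isIn "True" meth && PySem.Str.isIn "None" meth)) (fun x => x) false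
  let out := out ++ PySem.List.sorted
    (unsorted.filter (fun meth => PySem.Str.isIn "True" meth && !PySem.Str.isIn "None" meth)) (fun x => x) false
  out

-- ===== PORT B =====
-- Python tuples compare lexicographically, so the pairs live in `Lex (Int × String)` and
-- `sorted(pairs)` is PySem.List.sorted with the identity key.  B's assert passes on exactly the
-- same inputs as A's (Pre_), so it is not ported either.
def sort_method_list_alt (unsorted : List String) : List String :=
  let pairs : List (Lex (Int × String)) := unsorted.foldl (fun acc meth =>
    let hasF := PySem.Str.isIn "False" meth
    let hasT := PySem.Str.isIn "True" meth
    let hasN := PySem.Str.isIn "None" meth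
    let acc := if hasF && hasN then acc ++ [toLex ((0 : Int), meth)] else acc
    let acc := if hasF && !hasN then acc ++ [toLex ((1 : Int), meth)] else acc
    let acc := if hasT && hasN then acc ++ [toLex ((2 : Int), meth)] else acc
    let acc := if hasT && !hasN then acc ++ [toLex ((3 : Int), meth)] else acc
    acc) []
  (PySem.List.sorted pairs (fun p => p) false).map (fun p => (ofLex p).2)

-- ===== PRECONDITION & SPEC =====
-- Pre_ excludes exactly the inputs containing a method with neither 'False' nor 'True' as a
-- substring: such a method lands in no bucket and both Pythons raise AssertionError there.
def Pre_sort_method_list (unsorted : List String) : Prop :=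
  (unsorted.all (fun meth => PySem.Str.isIn "False" meth || PySem.Str.isIn "True" meth)) = true
instance (unsorted : List String) : Decidable (Pre_sort_method_list unsorted) := by
  unfold Pre_sort_method_list; infer_instance
def pvWitness_sort_method_list : List String := ["b_True_None", "a_False"]

def Spec_sort_method_list (unsorted : List String) (out : List String) : Prop := out = sort_method_list_alt unsorted
instance (unsorted : List String) (out : List String) : Decidable (Spec_sort_method_list unsorted out) := by unfold Spec_sort_method_list; infer_instance

-- ===== CLAIM =====
def Claim_equal_sort_method_list : Prop := ∀ (unsorted : List String), Dom_sort_method_list unsorted → Pre_sort_method_list unsorted → Spec_sort_method_list unsorted (sort_method_list unsorted)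

-- ===== LEMMAS AND PROOFS =====

-- The four category predicates and the tagging function (proof-side names for B's loop body).
def pvP0 (meth : String) : Bool := PySem.Str.isIn "False" meth && PySem.Str.isIn "None" meth
def pvP1 (meth : String) : Bool := PySem.Str.isIn "False" meth && !PySem.Str.isIn "None" meth
def pvP2 (meth : String) : Bool := PySem.Str.isIn "True" meth && PySem.Str.isIn "None" meth
def pvP3 (meth : String) : Bool := PySem.Str.isIn "True" meth && !PySem.Str.isIn "None" meth
def pvTagWith (r : Int) (meth : String) : Lex (Int × String) := toLex (r, meth)
def pvTag (meth : String) : List (Lex (Int × String)) :=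
  (if pvP0 meth then [pvTagWith 0 meth] else []) ++
  (if pvP1 meth then [pvTagWith 1 meth] else []) ++
  (if pvP2 meth then [pvTagWith 2 meth] else []) ++
  (if pvP3 meth then [pvTagWith 3 meth] else [])

-- B's loop builds exactly the flatMap of pvTag.
theorem pvPairs_eq (unsorted : List String) :
    (unsorted.foldl (fun acc meth =>
      let hasF := PySem.Str.isIn "False" meth
      let hasT := PySem.Str.isIn "True" meth
      let hasN := PySem.Str.isIn "None" meth
      let acc := if hasF && hasN then acc ++ [toLex ((0 : Int), meth)] else acc
      let acc := if hasF && !hasN then acc ++ [toLex ((1 : Int), meth)] else acc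
      let acc := if hasT && hasN then acc ++ [toLex ((2 : Int), meth)] else acc
      let acc := if hasT && !hasN then acc ++ [toLex ((3 : Int), meth)] else acc
      acc) []) = unsorted.flatMap pvTag := by
  have h : (fun (acc : List (Lex (Int × String))) (meth : String) =>
      let hasF := PySem.Str.isIn "False" meth
      let hasT := PySem.Str.isIn "True" meth
      let hasN := PySem.Str.isIn "None" meth
      let acc := if hasF && hasN then acc ++ [toLex ((0 : Int), meth)] else acc
      let acc := if hasF && !hasN then acc ++ [toLex ((1 : Int), meth)] else acc
      let acc := if hasT && hasN then acc ++ [toLex ((2 : Int), meth)] else acc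
      let acc := if hasT && !hasN then acc ++ [toLex ((3 : Int), meth)] else acc
      acc) = fun acc meth => acc ++ pvTag meth := by
    funext acc meth
    simp only [pvTag, pvP0, pvP1, pvP2, pvP3, pvTagWith]
    split_ifs <;> simp
  rw [h, PySem.List.foldl_append_eq_flatMap, List.nil_append]

-- A guarded singleton flatMap is map-over-filter.
theorem pvFlatMap_if (l : List String) (p : String → Bool) (t : String → Lex (Int × String)) :
    (l.flatMap fun x => if p x then [t x] else []) = (l.filter p).map t := by
  induction l with
  | nil => rfl
  | cons x xs ih => by_cases h : p x <;> simp [List.flatMap_cons, h, ih]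

-- The tagged pairs are a permutation of the four tagged buckets.
theorem pvPerm (l : List String) :
    (l.flatMap pvTag).Perm
      ((l.filter pvP0).map (pvTagWith 0) ++ (l.filter pvP1).map (pvTagWith 1) ++
       (l.filter pvP2).map (pvTagWith 2) ++ (l.filter pvP3).map (pvTagWith 3)) := by
  unfold pvTag
  refine ((List.flatMap_append_perm l _ _).symm.trans ?_)
  refine List.Perm.append ?_ ?_
  · refine ((List.flatMap_append_perm l _ _).symm.trans ?_)
    refine List.Perm.append ?_ ?_
    · refine ((List.flatMap_append_perm l _ _).symm.trans ?_)
      exact List.Perm.append (by rw [pvFlatMap_if]) (by rw [pvFlatMap_if])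
    · rw [pvFlatMap_if]
  · rw [pvFlatMap_if]

-- A tagged sorted bucket is ≤-pairwise in the lexicographic order.
theorem pvBlock_pairwise (l : List String) (p : String → Bool) (r : Int) :
    (((PySem.List.sorted (l.filter p) (fun x => x) false)).map (pvTagWith r)).Pairwise
      (fun a b => a ≤ b) := by
  refine List.Pairwise.map (pvTagWith r) ?_ (PySem.List.sorted_pairwise (l.filter p) (fun x => x))
  intro a b hab
  exact Prod.Lex.le_iff.mpr (Or.inr ⟨rfl, hab⟩)

-- Every element of a tagged bucket is ≤ every element of a higher-ranked tagged bucket.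
theorem pvCross (xs ys : List String) (r s : Int) (hrs : r < s)
    (x : Lex (Int × String)) (hx : x ∈ xs.map (pvTagWith r))
    (y : Lex (Int × String)) (hy : y ∈ ys.map (pvTagWith s)) : x ≤ y := by
  obtain ⟨a, -, rfl⟩ := List.mem_map.mp hx
  obtain ⟨b, -, rfl⟩ := List.mem_map.mp hy
  exact Prod.Lex.le_iff.mpr (Or.inl hrs)

-- ===== VERDICT =====
theorem sort_method_list_spec : Claim_equal_sort_method_list := by
  intro unsorted _ _
  unfold Spec_sort_method_list sort_method_list sort_method_list_alt
  dsimp only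
  rw [pvPairs_eq, List.nil_append]
  set b0 := PySem.List.sorted (unsorted.filter pvP0) (fun x => x) false with hb0
  set b1 := PySem.List.sorted (unsorted.filter pvP1) (fun x => x) false with hb1
  set b2 := PySem.List.sorted (unsorted.filter pvP2) (fun x => x) false with hb2
  set b3 := PySem.List.sorted (unsorted.filter pvP3) (fun x => x) false with hb3
  have hsorted : PySem.List.sorted (unsorted.flatMap pvTag) (fun p => p) false
      = b0.map (pvTagWith 0) ++ b1.map (pvTagWith 1) ++ b2.map (pvTagWith 2)
        ++ b3.map (pvTagWith 3) := by
    apply PySem.List.sorted_id_eq_of_perm_of_pairwise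
    · refine List.Perm.trans ?_ (pvPerm unsorted).symm
      refine List.Perm.append (List.Perm.append (List.Perm.append ?_ ?_) ?_) ?_ <;>
        exact (PySem.List.sorted_perm _ _ _).map _
    · refine List.pairwise_append.mpr ⟨List.pairwise_append.mpr
        ⟨List.pairwise_append.mpr ⟨?_, ?_, ?_⟩, ?_, ?_⟩, ?_, ?_⟩
      · exact pvBlock_pairwise unsorted pvP0 0
      · exact pvBlock_pairwise unsorted pvP1 1
      · intro x hx y hy
        exact pvCross b0 b1 0 1 (by norm_num) x hx y hy
      · exact pvBlock_pairwise unsorted pvP2 2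
      · intro x hx y hy
        rcases List.mem_append.mp hx with h | h
        · exact pvCross b0 b2 0 2 (by norm_num) x h y hy
        · exact pvCross b1 b2 1 2 (by norm_num) x h y hy
      · exact pvBlock_pairwise unsorted pvP3 3
      · intro x hx y hy
        rcases List.mem_append.mp hx with h | h
        · rcases List.mem_append.mp h with h' | h'
          · exact pvCross b0 b3 0 3 (by norm_num) x h' y hy
          · exact pvCross b1 b3 1 3 (by norm_num) x h' y hy
        · exact pvCross b2 b3 2 3 (by norm_num) x h y hy
  rw [hsorted]
  simp only [hb0, hb1, hb2, hb3]
  unfold pvP0 pvP1 pvP2 pvP3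
  simp [pvTagWith, Function.comp_def, List.append_assoc]
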